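-- pv_equiv track=rewrite | github.com/hpfn/wttd-2017-exerc | modulo_2/Codewars/dev-junior/str_increment.py | str_increment
-- ===== SOURCE A (Python) =====
-- def str_increment(string):
--     count = 0
--     new_str = ''
--     while abs(count) < len(string):
--         try:
--             count -= 1
--             if isinstance(int(string[count]), int):
--                 new_str = string[count:]
--         except ValueError:
--             count += 1
--             break
--
--     if new_str:
--         tam_new_str = len(new_str)
--         new_str = str(int(new_str) + 1)
--         string = string[:count]
--         string += '0' * (tam_new_str - len(new_str))
--         string += new_str
--     else:
--         string += '1'
--
--     return string
-- ===== SOURCE B (Python) =====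
-- def str_increment(string):
--     # Carry-propagation increment: walk the trailing digit run right-to-left,
--     # turning trailing nines into zeros; bump the first smaller digit in place,
--     # or insert a leading one when the carry runs past all digits.  No
--     # int()/str() round trip; the zero padding is preserved implicitly.
--     chars = list(string)
--     i = len(chars) - 1
--     while i >= 0 and '0' <= chars[i] <= '9':
--         if chars[i] == '9':
--             chars[i] = '0'
--             i -= 1
--         else:
--             chars[i] = chr(ord(chars[i]) + 1)
--             return ''.join(chars)
--     chars.insert(i + 1, '1')
--     return ''.join(chars)
-- ===== Notes on version B (the rewrite author's own statement) =====
-- stated objective: alternative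
-- what changed: Replaces A's backward scan plus int()/str() numeric round-trip and manual zero padding by in-place carry propagation over the characters: trailing nines become zeros, the first smaller digit is bumped by one code point, and a leading one is inserted when the carry passes the whole digit run.
import Mathlib
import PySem

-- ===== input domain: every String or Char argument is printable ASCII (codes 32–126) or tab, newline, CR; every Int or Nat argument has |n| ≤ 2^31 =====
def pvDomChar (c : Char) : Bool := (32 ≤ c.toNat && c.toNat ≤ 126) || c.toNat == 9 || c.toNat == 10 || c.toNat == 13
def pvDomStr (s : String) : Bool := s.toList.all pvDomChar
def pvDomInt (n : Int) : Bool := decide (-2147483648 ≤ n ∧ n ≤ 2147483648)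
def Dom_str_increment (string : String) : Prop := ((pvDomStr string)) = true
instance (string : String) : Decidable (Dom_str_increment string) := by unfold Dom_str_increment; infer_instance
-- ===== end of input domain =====

-- B replaces A's backward scan + int()/str() round-trip + manual zero padding by direct
-- carry propagation on the characters of the reversed string (objective: alternative).

-- ===== PORT A =====
-- the while loop of A: state (count, new_str); fuel bounds the iterations (at most len(string) of them happen)
def aLoop (s : List Char) (fuel : Nat) (count : Int) (new_str : List Char) : Int × List Char :=
  match fuel with
  | 0 => (count, new_str)
  | fuel + 1 =>
    if count.natAbs < s.length then
      match PySem.List.pyGet? s (count - 1) with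
      | none => (count - 1 + 1, new_str)         -- unreachable: |count - 1| ≤ len(s) here
      | some c =>
        match PySem.Int.ofChars? [c] with        -- try: int(string[count])
        | some _ => aLoop s fuel (count - 1) (PySem.List.slice s (some (count - 1)) none)
        | none => (count - 1 + 1, new_str)       -- except ValueError: count += 1; break
    else (count, new_str)

def str_increment (string : String) : String :=
  let s := string.toList
  let res := aLoop s (s.length + 1) 0 []
  let count := res.1
  let new_str := res.2
  if new_str ≠ [] then
    let tam_new_str := new_str.length
    -- int(new_str) cannot raise here: new_str is a non-empty run of ASCII digits
    let new_str2 := PySem.Int.toChars ((PySem.Int.ofChars? new_str).getD 0 + 1)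
    String.ofList (PySem.List.slice s none (some count) ++
      List.replicate (tam_new_str - new_str2.length) '0' ++ new_str2)
  else
    String.ofList (s ++ ['1'])

-- ===== PORT B =====
-- B's right-to-left carry loop, written as the obvious structural recursion over the
-- reversed character list (same traversal, same per-character cases as Source B's while loop)
def bump : List Char → List Char
  | [] => ['1']
  | c :: rest =>
    if c = '9' then '0' :: bump rest
    else if '0' ≤ c ∧ c ≤ '9' then Char.ofNat (c.toNat + 1) :: rest
    else '1' :: c :: rest

def str_increment_alt (string : String) : String :=
  -- run the carry loop from the last character; ''.join of the result
  String.ofList (bump string.toList.reverse).reverse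

-- ===== PRECONDITION & SPEC =====
def Spec_str_increment (string : String) (out : String) : Prop := out = str_increment_alt string
instance (string : String) (out : String) : Decidable (Spec_str_increment string out) := by unfold Spec_str_increment; infer_instance

-- ===== CLAIM (what is proved, stated in full; the proofs are below) =====
def Claim_equal_str_increment : Prop := ∀ (string : String), Dom_str_increment string → Spec_str_increment string (str_increment string)

-- ===== LEMMAS AND PROOFS =====

def isDig (c : Char) : Bool := decide ('0' ≤ c ∧ c ≤ '9')

-- decimal value of a digit run, folded left with accumulator acc (as CPython's int() does)
def dvf (acc : Nat) (ds : List Char) : Nat := ds.foldl (fun a x => a * 10 + (x.toNat - '0'.toNat)) acc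

def dval (ds : List Char) : Nat := dvf 0 ds

-- the decimal digit string of n (no leading zeros), mirroring Nat.toDigitsCore's recursion
def natChars (n : Nat) : List Char :=
  if h : n / 10 = 0 then [Nat.digitChar (n % 10)]
  else natChars (n / 10) ++ [Nat.digitChar (n % 10)]
termination_by n
decreasing_by
  exact Nat.div_lt_self (Nat.pos_of_ne_zero (fun h0 => h (by simp [h0]))) (by omega)

-- int() of one character succeeds exactly on the ten ASCII digits (on the ASCII domain)
lemma digit_iff (c : Char) (h : pvDomChar c = true) :
    (PySem.Int.ofChars? [c]).isSome = isDig c := by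
  have key : ∀ n : Fin 127, (PySem.Int.ofChars? [Char.ofNat n.val]).isSome = isDig (Char.ofNat n.val) := by
    decide
  have hlt : c.toNat < 127 := by
    simp only [pvDomChar, Bool.or_eq_true, Bool.and_eq_true, decide_eq_true_eq, beq_iff_eq] at h
    omega
  simpa [Char.ofNat_toNat] using key ⟨c.toNat, hlt⟩

lemma isDig_cases (c : Char) (h : isDig c = true) :
    c = '0' ∨ c = '1' ∨ c = '2' ∨ c = '3' ∨ c = '4' ∨ c = '5' ∨ c = '6' ∨ c = '7' ∨ c = '8' ∨ c = '9' := by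
  have h' : '0' ≤ c ∧ c ≤ '9' := of_decide_eq_true h
  have h1 : 48 ≤ c.toNat ∧ c.toNat ≤ 57 := ⟨h'.1, h'.2⟩
  have hc : c = Char.ofNat c.toNat := (Char.ofNat_toNat c).symm
  have : c.toNat = 48 ∨ c.toNat = 49 ∨ c.toNat = 50 ∨ c.toNat = 51 ∨ c.toNat = 52 ∨
      c.toNat = 53 ∨ c.toNat = 54 ∨ c.toNat = 55 ∨ c.toNat = 56 ∨ c.toNat = 57 := by omega
  rcases this with h | h | h | h | h | h | h | h | h | h <;>
    rw [hc, h] <;> simp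

lemma dig_not_space (c : Char) (h : isDig c = true) : PySem.Int.isIntSpace c = false := by
  rcases isDig_cases c h with h | h | h | h | h | h | h | h | h | h <;> subst h <;> decide

lemma dig_not_sign (c : Char) (h : isDig c = true) : c ≠ '-' ∧ c ≠ '+' := by
  rcases isDig_cases c h with h | h | h | h | h | h | h | h | h | h <;> subst h <;> decide

lemma dig_isDigit (c : Char) (h : isDig c = true) : c.isDigit = true := by
  rcases isDig_cases c h with h | h | h | h | h | h | h | h | h | h <;> subst h <;> decide

lemma dig_digitChar (c : Char) (h : isDig c = true) :
    Nat.digitChar (c.toNat - '0'.toNat) = c ∧ c.toNat - '0'.toNat ≤ 9 := by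
  rcases isDig_cases c h with h | h | h | h | h | h | h | h | h | h <;> subst h <;> decide

lemma succ_digit_facts (c : Char) (h : isDig c = true) (h9 : c ≠ '9') :
    isDig (Char.ofNat (c.toNat + 1)) = true ∧
      (Char.ofNat (c.toNat + 1)).toNat - '0'.toNat = (c.toNat - '0'.toNat) + 1 := by
  rcases isDig_cases c h with h | h | h | h | h | h | h | h | h | h <;> subst h <;>
    first | exact absurd rfl h9 | decide

-- ---- dvf arithmetic ----

lemma dvf_cons (acc : Nat) (c : Char) (ds : List Char) :
    dvf acc (c :: ds) = dvf (acc * 10 + (c.toNat - '0'.toNat)) ds := by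
  simp only [dvf, List.foldl_cons]

lemma dvf_append (acc : Nat) (xs ys : List Char) :
    dvf acc (xs ++ ys) = dvf (dvf acc xs) ys := by
  simp [dvf, List.foldl_append]

lemma dvf_singleton (acc : Nat) (c : Char) : dvf acc [c] = acc * 10 + (c.toNat - '0'.toNat) := rfl

lemma dvf_shift : ∀ (ds : List Char) (acc : Nat), dvf acc ds = acc * 10 ^ ds.length + dval ds := by
  intro ds
  induction ds with
  | nil => intro acc; simp [dvf, dval]
  | cons c t ih =>
    intro acc
    rw [dvf_cons, ih, show dval (c :: t) = dvf (0 * 10 + (c.toNat - '0'.toNat)) t from rfl,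
      ih (0 * 10 + (c.toNat - '0'.toNat))]
    simp only [List.length_cons, pow_succ]
    ring

lemma dvf_replicate_zero (k : Nat) (acc : Nat) : dvf acc (List.replicate k '0') = acc * 10 ^ k := by
  induction k generalizing acc with
  | zero => simp [dvf]
  | succ k ih =>
    rw [List.replicate_succ, dvf_cons, ih]
    have : '0'.toNat - '0'.toNat = 0 := by decide
    rw [this]
    ring

lemma dval_replicate_nine (k : Nat) : dval (List.replicate k '9') = 10 ^ k - 1 := by
  induction k with
  | zero => simp [dval, dvf]
  | succ k ih =>
    rw [List.replicate_succ, dval, dvf_cons, dvf_shift, ih]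
    have h1 : '9'.toNat - '0'.toNat = 9 := by decide
    have h2 : 1 ≤ 10 ^ k := Nat.one_le_pow _ _ (by omega)
    simp only [List.length_replicate, h1]
    rw [pow_succ]
    omega

-- ---- the exact value of int() on a pure digit run ----

lemma map_pure_of (o : Option Nat) (V : Nat) (h : o = some V) :
    (Option.map (fun n : Int => n) (o.bind fun a => pure ((a : Nat) : Int))) = some ((V : Nat) : Int) := by
  subst h; rfl

lemma parse_digits (c : Char) (rest : List Char)
    (hd : ∀ x ∈ c :: rest, x.isDigit = true)
    (hsp : (c :: rest).dropWhile PySem.Int.isIntSpace = c :: rest)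
    (hsp2 : (c :: rest).reverse.dropWhile PySem.Int.isIntSpace = (c :: rest).reverse)
    (hs1 : c ≠ '-') (hs2 : c ≠ '+') :
    PySem.Int.ofChars? (c :: rest) = some ((dvf 0 (c :: rest) : Nat) : Int) := by
  simp only [PySem.Int.ofChars?, hsp, hsp2, List.reverse_reverse]
  split
  · rename_i heq; injection heq with h1 _; exact absurd h1 hs1
  · rename_i heq; injection heq with h1 _; exact absurd h1 hs2
  · rename_i ds heq
    apply map_pure_of
    have hc : c.isDigit = true := hd c List.mem_cons_self
    have hrest : ∀ x ∈ rest, x.isDigit = true := fun x hx => hd x (List.mem_cons_of_mem _ hx)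
    rw [show dvf 0 (c :: rest) = dvf (0 * 10 + (c.toNat - '0'.toNat)) rest from rfl]
    conv_lhs => whnf
    rw [hc]
    conv_lhs => whnf
    generalize 0 * 10 + (c.toNat - '0'.toNat) = acc
    clear hc hd hsp hsp2 hs1 hs2 ds heq c
    induction rest generalizing acc with
    | nil =>
      conv_lhs => whnf
      rfl
    | cons d rest' ih =>
      have hdd : d.isDigit = true := hrest d List.mem_cons_self
      have hrest' : ∀ x ∈ rest', x.isDigit = true := fun x hx => hrest x (List.mem_cons_of_mem _ hx)
      conv_lhs => whnf
      rw [hdd]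
      conv_lhs => whnf
      rw [show dvf acc (d :: rest') = dvf (acc * 10 + (d.toNat - '0'.toNat)) rest' from rfl]
      exact ih hrest' _

lemma parse_run (ds : List Char) (hne : ds ≠ []) (hd : ∀ c ∈ ds, isDig c = true) :
    PySem.Int.ofChars? ds = some ((dval ds : Nat) : Int) := by
  obtain ⟨c, rest, rfl⟩ := List.exists_cons_of_ne_nil hne
  have hc : isDig c = true := hd c List.mem_cons_self
  have hsp : (c :: rest).dropWhile PySem.Int.isIntSpace = c :: rest := by
    rw [List.dropWhile_cons, if_neg]
    simp [dig_not_space c hc]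
  have hene : (c :: rest).reverse ≠ [] := by simp
  obtain ⟨c1, r1, he⟩ := List.exists_cons_of_ne_nil hene
  have hc1 : isDig c1 = true := by
    have : c1 ∈ (c :: rest).reverse := by rw [he]; exact List.mem_cons_self
    exact hd c1 (List.mem_reverse.mp this)
  have hsp2 : (c :: rest).reverse.dropWhile PySem.Int.isIntSpace = (c :: rest).reverse := by
    rw [he, List.dropWhile_cons, if_neg]
    simp [dig_not_space c1 hc1]
  exact parse_digits c rest (fun x hx => dig_isDigit x (hd x hx)) hsp hsp2
    (dig_not_sign c hc).1 (dig_not_sign c hc).2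

-- ---- str() of a natural number ----

lemma toDigitsCore_eq : ∀ (f n : Nat) (ds : List Char), n < f →
    Nat.toDigitsCore 10 f n ds = natChars n ++ ds := by
  intro f
  induction f with
  | zero => intro n ds h; omega
  | succ f ih =>
    intro n ds hn
    rw [Nat.toDigitsCore]
    by_cases h : n / 10 = 0
    · rw [if_pos h, natChars, dif_pos h]
      rfl
    · rw [if_neg h, natChars, dif_neg h]
      have h10 : 10 ≤ n := by
        by_contra hlt
        exact h (Nat.div_eq_of_lt (by omega))
      have : n / 10 < f := lt_of_lt_of_le (Nat.div_lt_self (by omega) (by omega)) (by omega)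
      rw [ih (n / 10) _ this]
      simp

lemma toChars_natCast (n : Nat) : PySem.Int.toChars ((n : Nat) : Int) = natChars n := by
  unfold PySem.Int.toChars
  rw [if_neg (by omega)]
  have : ((n : Int)).toNat = n := by omega
  rw [this]
  show Nat.toDigitsCore 10 (n + 1) n [] = natChars n
  rw [toDigitsCore_eq _ _ _ (by omega)]
  simp

lemma dval_pos (c : Char) (t : List Char) (hc : isDig c = true) (h0 : c ≠ '0') :
    1 ≤ dval (c :: t) := by
  have hd1 : 1 ≤ c.toNat - '0'.toNat := by
    rcases isDig_cases c hc with h | h | h | h | h | h | h | h | h | h <;> subst h <;>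
      first | exact absurd rfl h0 | decide
  rw [dval, dvf_cons, dvf_shift]
  have : 1 ≤ 10 ^ t.length := Nat.one_le_pow _ _ (by omega)
  have hge : 1 * 10 ^ t.length ≤ (0 * 10 + (c.toNat - '0'.toNat)) * 10 ^ t.length :=
    Nat.mul_le_mul_right _ (by omega)
  omega

lemma natChars_dval : ∀ (es : List Char), (∀ c ∈ es, isDig c = true) → es ≠ [] →
    es.head? ≠ some '0' → natChars (dval es) = es := by
  intro es
  induction es using List.reverseRecOn with
  | nil => intro _ h; exact absurd rfl h
  | append_singleton xs c ih =>
    intro hd _ h0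
    have hc : isDig c = true := hd c (by simp)
    have hdc := dig_digitChar c hc
    cases xs with
    | nil =>
      have hv : dval [c] = c.toNat - '0'.toNat := by simp [dval, dvf]
      rw [List.nil_append, hv, natChars, dif_pos (Nat.div_eq_of_lt (by omega))]
      rw [Nat.mod_eq_of_lt (by omega), hdc.1]
    | cons c0 xs' =>
      have h00 : c0 ≠ '0' := by
        intro h; apply h0; subst h; simp
      have hd0 : ∀ x ∈ c0 :: xs', isDig x = true := by
        intro x hx
        rcases List.mem_cons.mp hx with rfl | hx
        · exact hd x List.mem_cons_self
        · exact hd x (List.mem_cons_of_mem _ (List.mem_append_left _ hx))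
      have hpos : 1 ≤ dval (c0 :: xs') := dval_pos c0 xs' (hd0 c0 List.mem_cons_self) h00
      have hv : dval ((c0 :: xs') ++ [c]) = dval (c0 :: xs') * 10 + (c.toNat - '0'.toNat) := by
        rw [dval, dvf_append, dvf_singleton]
        rfl
      have hdiv : dval ((c0 :: xs') ++ [c]) / 10 = dval (c0 :: xs') := by rw [hv]; omega
      have hmod : dval ((c0 :: xs') ++ [c]) % 10 = c.toNat - '0'.toNat := by rw [hv]; omega
      rw [natChars, dif_neg (by omega), hdiv, hmod, hdc.1,
        ih hd0 (by simp) (by simpa using h00)]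

lemma pad_natChars : ∀ (es : List Char), (∀ c ∈ es, isDig c = true) → 1 ≤ dval es →
    List.replicate (es.length - (natChars (dval es)).length) '0' ++ natChars (dval es) = es := by
  intro es
  induction es with
  | nil => intro _ h; simp [dval, dvf] at h
  | cons c es' ih =>
    intro hd hpos
    by_cases hc0 : c = '0'
    · subst hc0
      have hv : dval ('0' :: es') = dval es' := by
        simp [dval, dvf_cons]
      have hd' : ∀ x ∈ es', isDig x = true := fun x hx => hd x (List.mem_cons_of_mem _ hx)
      have hpos' : 1 ≤ dval es' := by rw [← hv]; exact hpos
      have hIH := ih hd' hpos'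
      have hlen : (natChars (dval es')).length ≤ es'.length := by
        have := congrArg List.length hIH
        simp at this
        omega
      rw [hv]
      have : (('0' :: es').length) - (natChars (dval es')).length
          = ((es'.length) - (natChars (dval es')).length) + 1 := by
        simp [List.length_cons]; omega
      rw [this, List.replicate_succ, List.cons_append, hIH]
    · have hn := natChars_dval (c :: es') hd (by simp) (by simpa using hc0)
      rw [hn]
      simp

-- ---- bump (B's carry) ----

lemma bump_head_nondigit (h : List Char)
    (hh : h = [] ∨ ∃ c t, h = c :: t ∧ isDig c = false) : bump h = '1' :: h := by
  rcases hh with rfl | ⟨c, t, rfl, hc⟩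
  · rfl
  · have h9 : ¬ c = '9' := by
      intro h; subst h; simp [isDig] at hc
    have hrange : ¬ ('0' ≤ c ∧ c ≤ '9') := by
      intro h; rw [show isDig c = true from decide_eq_true h] at hc; cases hc
    rw [bump, if_neg h9, if_neg hrange]

lemma bump_nines (k : Nat) (h : List Char) :
    bump (List.replicate k '9' ++ h) = List.replicate k '0' ++ bump h := by
  induction k with
  | zero => simp
  | succ k ih =>
    rw [List.replicate_succ, List.cons_append, bump, if_pos rfl, ih, List.replicate_succ,
      List.cons_append]

lemma bump_digit_ne9 (c : Char) (l : List Char) (hc : isDig c = true) (h9 : c ≠ '9') :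
    bump (c :: l) = Char.ofNat (c.toNat + 1) :: l := by
  rw [bump, if_neg h9, if_pos (of_decide_eq_true hc)]

-- ---- A-side helpers (indexing / slicing) ----

lemma pyGet?_neg (s : List Char) (k : Nat) (hk : k < s.length) :
    PySem.List.pyGet? s (-((k : Int) + 1)) = some (s[s.length - 1 - k]'(by omega)) := by
  simp only [PySem.List.pyGet?, PySem.List.pyIdx?]
  rw [if_neg (by omega), if_pos (by omega)]
  have h1 : ((-(-((k : Int) + 1))).toNat) = k + 1 := by omega
  rw [h1]
  simp only [Option.bind_some]
  rw [show s.length - (k + 1) = s.length - 1 - k from by omega]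
  rw [List.getElem?_eq_getElem (by omega)]

lemma slice_from_neg (s : List Char) (k : Nat) (hk : k ≤ s.length) (h0 : 0 < k) :
    PySem.List.slice s (some (-(k : Int))) none = s.drop (s.length - k) := by
  simp only [PySem.List.slice, PySem.List.clampIdx]
  rw [if_pos (by omega), if_neg (by omega)]
  have h1 : ((s.length : Int) + -(k : Int)).toNat = s.length - k := by omega
  rw [h1]
  exact List.take_of_length_le (by simp)

lemma slice_to_neg (s : List Char) (k : Nat) (hk : k ≤ s.length) (h0 : 0 < k) :
    PySem.List.slice s none (some (-(k : Int))) = s.take (s.length - k) := by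
  simp only [PySem.List.slice, PySem.List.clampIdx]
  rw [if_pos (by omega), if_neg (by omega)]
  have h1 : ((s.length : Int) + -(k : Int)).toNat = s.length - k := by omega
  rw [h1]
  simp

-- characterization of A's loop: it stops with count = -R and new_str = the trailing digit run,
-- where R is the length of the trailing run of ASCII digits
lemma aLoop_char (s : List Char) (hdom : ∀ c ∈ s, pvDomChar c = true)
    (R : Nat) (hR : R = (s.reverse.takeWhile isDig).length) :
    ∀ fuel i, i ≤ R → s.length - i < fuel →
      aLoop s fuel (-(i : Int)) (s.drop (s.length - i)) = (-(R : Int), s.drop (s.length - R)) := by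
  have hrev : s.reverse.length = s.length := by simp
  have hRle : R ≤ s.length := by
    rw [hR, ← hrev]; exact (List.takeWhile_prefix (l := s.reverse) isDig).length_le
  have htw : s.reverse.takeWhile isDig = s.reverse.take R := by
    conv_lhs => rw [List.prefix_iff_eq_take.mp (List.takeWhile_prefix _)]
    rw [← hR]
  have hdw : s.reverse.dropWhile isDig = s.reverse.drop R := by
    have h1 := List.takeWhile_append_dropWhile (p := isDig) (l := s.reverse)
    rw [htw] at h1
    have h2 : s.reverse.take R ++ s.reverse.drop R = s.reverse := List.take_append_drop _ _
    exact List.append_cancel_left (h1.trans h2.symm)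
  have hlt : ∀ i, i < R → ∀ (h : i < s.reverse.length), isDig (s.reverse[i]'h) = true := by
    intro i hi h
    have hlen : i < (s.reverse.take R).length := by
      simp only [List.length_take]; omega
    have he : (s.reverse.take R)[i]'hlen = s.reverse[i]'h :=
      (List.take_prefix R s.reverse).getElem hlen
    have hm : s.reverse[i]'h ∈ s.reverse.takeWhile isDig := by
      rw [htw, ← he]; exact List.getElem_mem _
    exact List.mem_takeWhile_imp hm
  have hstop : R < s.length → ∀ (h : R < s.reverse.length), isDig (s.reverse[R]'h) = false := by
    intro hRlt h
    have hne : s.reverse.drop R ≠ [] := by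
      have : 0 < (s.reverse.drop R).length := by simp only [List.length_drop]; omega
      exact List.ne_nil_of_length_pos this
    have hne' : s.reverse.dropWhile isDig ≠ [] := by rw [hdw]; exact hne
    have hh := List.head_dropWhile_not isDig hne'
    have heads : (s.reverse.dropWhile isDig).head hne' = (s.reverse.drop R).head hne := by
      congr 1
    rw [heads, List.head_drop] at hh
    exact hh
  intro fuel
  induction fuel with
  | zero => intro i hi hf; omega
  | succ f ih =>
    intro i hi hf
    by_cases hilen : i < s.length
    · have hcond : ((-(i : Int)).natAbs < s.length) := by
        simpa using hilen
      have e1 : (-(i : Int)) - 1 = -((i : Int) + 1) := by ring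
      rw [aLoop, if_pos hcond, e1, pyGet?_neg s i hilen]
      have hmem : s[s.length - 1 - i]'(by omega) ∈ s := List.getElem_mem _
      have hiff := digit_iff _ (hdom _ hmem)
      have hrevi : ∀ (h : i < s.reverse.length), s.reverse[i]'h = s[s.length - 1 - i]'(by omega) := by
        intro h; rw [List.getElem_reverse]
      split
      · rename_i heq
        exact absurd heq (by simp)
      · rename_i c heq
        injection heq with hc
        subst hc
        by_cases hir : i < R
        · have hd : isDig (s[s.length - 1 - i]'(by omega)) = true := by
            rw [← hrevi (by omega)]; exact hlt i hir _
          have hsome : (PySem.Int.ofChars? [s[s.length - 1 - i]'(by omega)]).isSome = true := by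
            rw [hiff]; exact hd
          split
          · rename_i v hv
            have e2 : -((i : Int) + 1) = -(((i + 1 : Nat) : Int)) := by push_cast; ring
            rw [e2, slice_from_neg s (i + 1) (by omega) (by omega)]
            exact ih (i + 1) (by omega) (by omega)
          · rename_i hv
            rw [hv] at hsome
            simp at hsome
        · have hiR : i = R := by omega
          subst hiR
          have hd : isDig (s[s.length - 1 - i]'(by omega)) = false := by
            rw [← hrevi (by omega)]; exact hstop hilen _
          have hnone : PySem.Int.ofChars? [s[s.length - 1 - i]'(by omega)] = none := by
            rw [← Option.not_isSome_iff_eq_none, hiff, hd]; simp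
          split
          · rename_i v hv
            rw [hnone] at hv
            exact absurd hv (by simp)
          · simp only [Prod.mk.injEq]
            exact ⟨by ring, trivial⟩
    · have hiR : i = R := by omega
      subst hiR
      rw [aLoop, if_neg (by simpa using hilen)]

theorem str_increment_spec : Claim_equal_str_increment := by
  intro string hdom'
  have hdom : ∀ c ∈ string.toList, pvDomChar c = true := by
    unfold Dom_str_increment pvDomStr at hdom'
    simpa [List.all_eq_true] using hdom'
  obtain ⟨R, hRdef⟩ : ∃ R, R = ((string.toList).reverse.takeWhile isDig).length := ⟨_, rfl⟩
  have hrev : (string.toList).reverse.length = (string.toList).length := by simp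
  have hRle : R ≤ (string.toList).length := by
    rw [hRdef, ← hrev]
    exact (List.takeWhile_prefix (l := (string.toList).reverse) isDig).length_le
  have hloop := aLoop_char (string.toList) hdom R hRdef ((string.toList).length + 1) 0
    (Nat.zero_le _) (by omega)
  simp only [Nat.cast_zero, neg_zero, Nat.sub_zero, List.drop_length] at hloop
  have htw : (string.toList).reverse.takeWhile isDig = (string.toList).reverse.take R := by
    conv_lhs => rw [List.prefix_iff_eq_take.mp (List.takeWhile_prefix _)]
    rw [← hRdef]
  have hdw : (string.toList).reverse.dropWhile isDig = (string.toList).reverse.drop R := by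
    have h1 := List.takeWhile_append_dropWhile (p := isDig) (l := (string.toList).reverse)
    rw [htw] at h1
    have h2 := List.take_append_drop R (string.toList).reverse
    exact List.append_cancel_left (h1.trans h2.symm)
  have hsplit : (string.toList).reverse.takeWhile isDig ++ (string.toList).reverse.dropWhile isDig
      = (string.toList).reverse := List.takeWhile_append_dropWhile
  have hhead : ((string.toList).reverse.dropWhile isDig).reverse
      = (string.toList).take ((string.toList).length - R) := by
    rw [hdw, List.reverse_drop]
    simp
  have hdrop_rev : ((string.toList).drop ((string.toList).length - R)).reverse
      = (string.toList).reverse.takeWhile isDig := by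
    rw [htw, List.reverse_drop]
    congr 1
    omega
  have hdlen : ((string.toList).drop ((string.toList).length - R)).length = R := by
    rw [List.length_drop]; omega
  have hddig : ∀ c ∈ (string.toList).drop ((string.toList).length - R), isDig c = true := by
    intro c hc
    have h1 := List.mem_reverse.mpr hc
    rw [hdrop_rev] at h1
    exact List.mem_takeWhile_imp h1
  have hnd : (string.toList).reverse.dropWhile isDig = [] ∨
      ∃ c t, (string.toList).reverse.dropWhile isDig = c :: t ∧ isDig c = false := by
    cases hcase : (string.toList).reverse.dropWhile isDig with
    | nil => exact Or.inl rfl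
    | cons c t =>
      refine Or.inr ⟨c, t, rfl, ?_⟩
      have hne : (string.toList).reverse.dropWhile isDig ≠ [] := by simp [hcase]
      have hh := List.head_dropWhile_not isDig hne
      simpa [hcase] using hh
  show str_increment string = str_increment_alt string
  simp only [str_increment, str_increment_alt]
  rw [hloop]
  by_cases hR0 : R = 0
  · -- no trailing digits: both sides append '1'
    subst hR0
    have hnil : (string.toList).drop ((string.toList).length - 0) = [] := by simp
    rw [show ((-(0 : Nat) : Int), (string.toList).drop ((string.toList).length - 0)).2
        = (string.toList).drop ((string.toList).length - 0) from rfl, hnil]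
    rw [if_neg (by simp)]
    have hrds : (string.toList).reverse.takeWhile isDig = [] := by
      have hlen0 : ((string.toList).reverse.takeWhile isDig).length = 0 := hRdef.symm
      simpa using hlen0
    have hdw0 : (string.toList).reverse.dropWhile isDig = (string.toList).reverse := by
      have h1 := hsplit
      rw [hrds] at h1
      simpa using h1
    have hb : bump (string.toList).reverse = '1' :: (string.toList).reverse := by
      rw [← hdw0]
      exact bump_head_nondigit _ hnd
    rw [hb]
    simp
  · -- R ≥ 1: the digit run is non-empty
    have hne : (string.toList).drop ((string.toList).length - R) ≠ [] := by
      apply List.ne_nil_of_length_pos; omega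
    rw [show ((-(R : Int), (string.toList).drop ((string.toList).length - R))).2
        = (string.toList).drop ((string.toList).length - R) from rfl]
    rw [if_pos hne]
    set s := string.toList with hs
    set ds := s.drop (s.length - R) with hds
    set htl := s.reverse.dropWhile isDig with hhtl
    rw [parse_run ds hne hddig]
    rw [show ((-(R : Int), ds)).1 = (-(R : Int)) from rfl]
    rw [slice_to_neg s R hRle (by omega), ← hhead]
    simp only [Option.getD_some]
    have hcast : (((dval ds : Nat) : Int) + 1) = (((dval ds + 1 : Nat)) : Int) := by push_cast; ring
    rw [hcast, toChars_natCast, hdlen]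
    -- decompose the digit run from the right into nines and (possibly) a non-nine digit
    set rds := s.reverse.takeWhile isDig with hrds
    have hrdig : ∀ c ∈ rds, isDig c = true := fun c hc => List.mem_takeWhile_imp hc
    have hRlen : rds.length = R := hRdef.symm
    have hsplit9 : rds.takeWhile (fun x => x == '9') ++ rds.dropWhile (fun x => x == '9') = rds :=
      List.takeWhile_append_dropWhile
    have ht9 : rds.takeWhile (fun x => x == '9')
        = List.replicate (rds.takeWhile (fun x => x == '9')).length '9' := by
      apply List.eq_replicate_of_mem
      intro b hb
      have := List.mem_takeWhile_imp hb
      simpa using this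
    have hsrev : rds ++ htl = s.reverse := hsplit
    cases hd9 : rds.dropWhile (fun x => x == '9') with
    | nil =>
      -- the whole run is nines: 99…9 + 1 = 10…0, one digit longer
      have hrds9 : rds = List.replicate R '9' := by
        have h1 : rds.takeWhile (fun x => x == '9') = rds := by
          have := hsplit9; rw [hd9] at this; simpa using this
        rw [← h1, ht9, h1, hRlen]
      have hds9 : ds = List.replicate R '9' := by
        have : ds.reverse = rds := hdrop_rev
        rw [hrds9] at this
        rw [← List.reverse_reverse ds, this, List.reverse_replicate]
      have h10 : 1 ≤ 10 ^ R := Nat.one_le_pow _ _ (by omega)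
      have hplus : dval ds + 1 = 10 ^ R := by
        rw [hds9, dval_replicate_nine]; omega
      have hesdig : ∀ x ∈ '1' :: List.replicate R '0', isDig x = true := by
        intro x hx
        rcases List.mem_cons.mp hx with rfl | hx
        · decide
        · rw [List.eq_of_mem_replicate hx]; decide
      have hesv : dval ('1' :: List.replicate R '0') = 10 ^ R := by
        rw [dval, dvf_cons, dvf_replicate_zero,
          show (0 * 10 + ('1'.toNat - '0'.toNat)) = 1 from by decide, one_mul]
      have hnc : natChars (dval ds + 1) = '1' :: List.replicate R '0' := by
        rw [hplus, ← hesv]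
        exact natChars_dval _ hesdig (by simp) (by simp)
      have hlen1 : R - ('1' :: List.replicate R '0').length = 0 := by simp
      have hbump : bump s.reverse = List.replicate R '0' ++ ('1' :: htl) := by
        rw [← hsrev, hrds9, bump_nines, bump_head_nondigit _ hnd]
      rw [hnc, hlen1, hbump]
      simp [List.reverse_append, List.append_assoc]
    | cons c tl =>
      -- run = tl.reverse ++ c ++ 9…9 (k nines); bump turns it into tl.reverse ++ (c+1) ++ 0…0
      set k := (rds.takeWhile (fun x => x == '9')).length with hk
      have hcmem : c ∈ rds := by
        rw [← hsplit9, hd9]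
        exact List.mem_append_right _ List.mem_cons_self
      have hcdig : isDig c = true := hrdig c hcmem
      have hc9 : c ≠ '9' := by
        have hnenil : rds.dropWhile (fun x => x == '9') ≠ [] := by simp [hd9]
        have h1 := List.head_dropWhile_not (fun x => x == '9') hnenil
        have h2 : (rds.dropWhile (fun x => x == '9')).head? = some c := by rw [hd9]; rfl
        rw [List.head?_eq_some_head hnenil] at h2
        rw [Option.some.injEq] at h2
        rw [h2] at h1
        simpa using h1
      have htlsub : ∀ x ∈ tl, isDig x = true := by
        intro x hx
        apply hrdig
        rw [← hsplit9, hd9]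
        exact List.mem_append_right _ (List.mem_cons_of_mem _ hx)
      have hrdseq : rds = List.replicate k '9' ++ c :: tl := by
        rw [← hsplit9, hd9, ht9]
      have hdseq : ds = tl.reverse ++ (c :: List.replicate k '9') := by
        have : ds.reverse = rds := hdrop_rev
        rw [hrdseq] at this
        rw [← List.reverse_reverse ds, this]
        simp [List.reverse_append, List.reverse_replicate, List.append_assoc]
      obtain ⟨hcdig', hcval'⟩ := succ_digit_facts c hcdig hc9
      set c' := Char.ofNat (c.toNat + 1) with hc'
      set es := tl.reverse ++ c' :: List.replicate k '0' with hes
      have hesdig : ∀ x ∈ es, isDig x = true := by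
        intro x hx
        rcases List.mem_append.mp hx with hx | hx
        · exact htlsub x (List.mem_reverse.mp hx)
        · rcases List.mem_cons.mp hx with rfl | hx
          · exact hcdig'
          · rw [List.eq_of_mem_replicate hx]; decide
      have hlen_es : es.length = R := by
        rw [hes, ← hRlen, hrdseq]
        simp
        omega
      have hP : 1 ≤ 10 ^ k := Nat.one_le_pow _ _ (by omega)
      have hdvds : dval ds = (dvf 0 tl.reverse * 10 + (c.toNat - '0'.toNat)) * 10 ^ k + (10 ^ k - 1) := by
        rw [hdseq, dval, dvf_append, dvf_cons, dvf_shift, ← dval_replicate_nine k]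
        simp
      have hdves : dval es = (dvf 0 tl.reverse * 10 + (c.toNat - '0'.toNat) + 1) * 10 ^ k := by
        rw [hes, dval, dvf_append, dvf_cons, hcval', dvf_replicate_zero]
        ring_nf
      have hplus : dval ds + 1 = dval es := by
        rw [hdvds, hdves]
        have : (dvf 0 tl.reverse * 10 + (c.toNat - '0'.toNat) + 1) * 10 ^ k
            = (dvf 0 tl.reverse * 10 + (c.toNat - '0'.toNat)) * 10 ^ k + 10 ^ k := by ring
        rw [this]
        omega
      have hpos : 1 ≤ dval es := by
        rw [hdves]
        exact Nat.one_le_iff_ne_zero.mpr (Nat.mul_ne_zero (by omega) (by omega))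
      have hpad := pad_natChars es hesdig hpos
      rw [hplus]
      rw [show R - (natChars (dval es)).length = es.length - (natChars (dval es)).length from by
        rw [hlen_es]]
      have hbump : bump s.reverse = List.replicate k '0' ++ c' :: (tl ++ htl) := by
        rw [← hsrev, hrdseq, List.append_assoc, List.cons_append,
          bump_nines, bump_digit_ne9 c _ hcdig hc9]
      rw [hbump]
      rw [List.append_assoc, hpad]
      rw [hes]
      simp [List.reverse_append, List.append_assoc]
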